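-- pv_equiv track=rewrite | github.com/andreirtaylor/SATSudoku | sud2sat.py | one_num_per_entry_clause
-- ===== SOURCE A (Python) =====
-- def base_convert(row, col, val, base):
--     return int(base**2) * (row) + base * (col) + (int(val) - 1) + 1
--
-- def ind_val_to_base(ind, val, base):
--     i = ind // base
--     j = ind % base
--     return base_convert(i,j,val,base)
--
-- def one_num_per_entry_clause(size):
--     ret = []
--     #ret.append("c one number per entry")
--     for i in range(int(size**2)):
--         row = []
--         for val in range(1, size + 1):
--             row.append(str(ind_val_to_base(i, val, size)))
--         ret.append(" ".join(row))
--     return ret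
-- ===== SOURCE B (Python) =====
-- def one_num_per_entry_clause(size):
--     # Stage 1: the labels are exactly the consecutive integers 1..size^3; render them all once.
--     nums = [str(n) for n in range(1, size ** 3 + 1)]
--     # Stage 2: chunk the flat list into size^2 consecutive windows of length size.
--     return [" ".join(nums[i * size:(i + 1) * size]) for i in range(size ** 2)]
-- ===== Notes on version B (the rewrite author's own statement) =====
-- stated objective: simpler
-- what changed: B is a two-stage build-then-chunk decomposition: it first renders the flat list of all size^3 consecutive labels str(1)..str(size^3) in one pass, then forms each clause by slicing consecutive length-size windows out of that list, eliminating A's per-(cell,value) div/mod index arithmetic and its two helper functions.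
import Mathlib
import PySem

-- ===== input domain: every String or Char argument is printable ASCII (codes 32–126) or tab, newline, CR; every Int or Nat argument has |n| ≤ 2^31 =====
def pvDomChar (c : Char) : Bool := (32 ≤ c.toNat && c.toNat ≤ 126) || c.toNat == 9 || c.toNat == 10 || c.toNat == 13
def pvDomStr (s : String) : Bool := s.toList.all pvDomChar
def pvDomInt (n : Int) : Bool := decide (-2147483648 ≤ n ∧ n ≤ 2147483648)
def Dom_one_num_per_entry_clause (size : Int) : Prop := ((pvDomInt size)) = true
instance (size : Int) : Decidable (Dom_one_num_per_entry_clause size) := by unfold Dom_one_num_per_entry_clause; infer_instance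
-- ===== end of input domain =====

-- B renders the flat list of all size^3 consecutive labels once, then slices each clause out of
-- it as a contiguous window, replacing A's per-cell div/mod helpers (simpler decomposition).

-- ===== PORT A =====
def pvBaseConvert (row col val base : Int) : Int :=
  base ^ 2 * row + base * col + (val - 1) + 1

def pvIndValToBase (ind val base : Int) : Int :=
  pvBaseConvert (PySem.Int.floordiv ind base) (PySem.Int.mod ind base) val base

def one_num_per_entry_clause (size : Int) : List String :=
  (PySem.List.pyRange 0 (size ^ 2) 1).foldl (fun ret i =>
    ret ++ [PySem.Str.join " "
      ((PySem.List.pyRange 1 (size + 1) 1).foldl (fun row val =>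
        row ++ [PySem.Int.toStr (pvIndValToBase i val size)]) [])]) []

-- ===== PORT B =====
def one_num_per_entry_clause_alt (size : Int) : List String :=
  let nums := (PySem.List.pyRange 1 (size ^ 3 + 1) 1).map PySem.Int.toStr
  (PySem.List.pyRange 0 (size ^ 2) 1).map (fun i =>
    PySem.Str.join " " (PySem.List.slice nums (some (i * size)) (some ((i + 1) * size))))

-- ===== PRECONDITION & SPEC =====
def Spec_one_num_per_entry_clause (size : Int) (out : List String) : Prop := out = one_num_per_entry_clause_alt size
instance (size : Int) (out : List String) : Decidable (Spec_one_num_per_entry_clause size out) := by unfold Spec_one_num_per_entry_clause; infer_instance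

-- ===== CLAIM =====
def Claim_equal_one_num_per_entry_clause : Prop := ∀ (size : Int), Dom_one_num_per_entry_clause size → Spec_one_num_per_entry_clause size (one_num_per_entry_clause size)

-- ===== LEMMAS AND PROOFS =====

-- a foldl that pushes f x onto the accumulator is a map
theorem pvFoldlPush {α β : Type} (l : List α) (f : α → β) (acc : List β) :
    l.foldl (fun r x => r ++ [f x]) acc = acc ++ l.map f := by
  induction l generalizing acc with
  | nil => simp
  | cons x xs ih => simp [List.foldl, ih]

-- A's label arithmetic collapses to the consecutive-label formula
theorem pvLabelEq (i val size : Int) : pvIndValToBase i val size = size * i + val := by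
  unfold pvIndValToBase pvBaseConvert
  have h := PySem.Int.floordiv_mul_add_mod i size
  linear_combination size * h

-- for the k-th clause, A's rendered row is the k-th window of B's flat label list
theorem pvWindowEq (s k : Nat) (hk : k < s ^ 2) :
    (PySem.List.pyRange 1 ((s : Int) + 1) 1).map
        (fun val => PySem.Int.toStr (pvIndValToBase (k : Int) val (s : Int)))
      = PySem.List.slice ((PySem.List.pyRange 1 ((s : Int) ^ 3 + 1) 1).map PySem.Int.toStr)
          (some ((k : Int) * (s : Int))) (some (((k : Int) + 1) * (s : Int))) := by
  have hcast : ((k : Int) + 1) * (s : Int) = ((k * s : Nat) : Int) + ((s : Nat) : Int) := by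
    push_cast; ring
  have hcast2 : (k : Int) * (s : Int) = ((k * s : Nat) : Int) := by push_cast; ring
  rw [hcast, hcast2, PySem.List.slice_natCast_add]
  rw [PySem.List.pyRange_one, PySem.List.pyRange_one]
  have h1 : ((s : Int) + 1 - 1).toNat = s := by omega
  have h3 : ((s : Int) ^ 3 + 1 - 1).toNat = s ^ 3 := by
    have : ((s : Int) ^ 3) = ((s ^ 3 : Nat) : Int) := by push_cast; ring
    omega
  rw [h1, h3, List.map_map, List.map_map, ← List.map_drop, ← List.map_take]
  have hle : k * s + s ≤ s ^ 3 := by nlinarith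
  apply List.ext_getElem
  · simp; omega
  · intro n hn1 hn2
    simp only [List.getElem_map, List.getElem_take, List.getElem_drop, List.getElem_range,
      Function.comp]
    congr 1
    rw [pvLabelEq]
    have hlen : n < s := by simpa using hn1
    push_cast
    ring
-- ===== VERDICT =====
theorem one_num_per_entry_clause_spec : Claim_equal_one_num_per_entry_clause := by
  intro size _
  unfold Spec_one_num_per_entry_clause one_num_per_entry_clause one_num_per_entry_clause_alt
  rw [pvFoldlPush, List.nil_append]
  refine List.map_congr_left ?_
  intro i hi
  rw [pvFoldlPush, List.nil_append]
  congr 1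
  rcases le_or_gt 0 size with hs | hs
  · obtain ⟨s, rfl⟩ : ∃ s : Nat, size = (s : Int) := ⟨size.toNat, (Int.toNat_of_nonneg hs).symm⟩
    rw [PySem.List.mem_pyRange_one] at hi
    obtain ⟨k, rfl⟩ : ∃ k : Nat, i = (k : Int) := ⟨i.toNat, (Int.toNat_of_nonneg hi.1).symm⟩
    have hk : k < s ^ 2 := by
      have := hi.2
      have hc : ((s : Int) ^ 2) = ((s ^ 2 : Nat) : Int) := by push_cast; ring
      omega
    exact pvWindowEq s k hk
  · -- size < 0: the inner range and the flat label list are both empty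
    have h1 : PySem.List.pyRange 1 (size + 1) 1 = [] :=
      PySem.List.pyRange_one_eq_nil (by omega)
    have hcube : size ^ 3 < 0 := by
      have := mul_neg_of_pos_of_neg (mul_pos_of_neg_of_neg hs hs) hs
      nlinarith
    have h2 : PySem.List.pyRange 1 (size ^ 3 + 1) 1 = [] :=
      PySem.List.pyRange_one_eq_nil (by omega)
    rw [h1, h2]
    simp [PySem.List.slice]
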